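-- pv_equiv track=rewrite | github.com/nizamogluyekta/LLM_Benchmark | src/benchmark/evaluation/results_analyzer.py | _determine_overall_trend
-- ===== SOURCE A (Python) =====
-- from typing import Any
--
-- def _determine_overall_trend(improvements: dict[str, Any]) -> str:
--     """Determine overall performance trend."""
--     if not improvements:
--         return "no_data"
--
--     improving_count = sum(1 for data in improvements.values() if data["trend"] == "improving")
--     declining_count = sum(1 for data in improvements.values() if data["trend"] == "declining")
--
--     if improving_count > declining_count:
--         return "improving"
--     elif declining_count > improving_count:
--         return "declining"
--     else:
--         return "stable"
-- ===== SOURCE B (Python) =====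
-- def _determine_overall_trend(improvements: dict) -> str:
--     """Determine overall trend by pairwise cancellation on a stack.
--
--     Each 'improving' cancels one pending 'declining' and vice versa; the
--     stack stays homogeneous, so the survivor on top (if any) is the trend.
--     """
--     if not improvements:
--         return "no_data"
--     stack = []
--     for data in improvements.values():
--         t = data["trend"]
--         if t == "improving" or t == "declining":
--             if stack and stack[-1] != t:
--                 stack.pop()
--             else:
--                 stack.append(t)
--     return stack[-1] if stack else "stable"
-- ===== Notes on version B (the rewrite author's own statement) =====
-- stated objective: alternative
-- what changed: Replaces A's two counting passes and count comparison with a single-pass pairwise-cancellation stack: opposite trends annihilate each other and the surviving homogeneous stack (or its emptiness) decides the result, so no counts are ever compared.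
import Mathlib
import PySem

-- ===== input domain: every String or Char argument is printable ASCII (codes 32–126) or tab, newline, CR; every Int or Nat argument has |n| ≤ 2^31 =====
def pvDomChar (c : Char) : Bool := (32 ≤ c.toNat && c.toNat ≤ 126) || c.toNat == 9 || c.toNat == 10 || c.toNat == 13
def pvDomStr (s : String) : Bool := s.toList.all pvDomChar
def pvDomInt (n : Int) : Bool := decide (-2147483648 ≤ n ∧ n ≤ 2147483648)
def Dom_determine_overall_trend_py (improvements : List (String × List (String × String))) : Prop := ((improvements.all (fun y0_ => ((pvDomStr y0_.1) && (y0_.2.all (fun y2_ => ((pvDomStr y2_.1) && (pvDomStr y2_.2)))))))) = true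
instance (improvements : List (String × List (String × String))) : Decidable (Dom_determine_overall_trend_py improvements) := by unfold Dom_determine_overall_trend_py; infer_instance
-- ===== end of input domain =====

-- B replaces A's two counting passes with a single-pass pairwise-cancellation stack; objective: alternative.


-- ===== PORT A =====
-- data["trend"]: under Pre_ the key is present, so getD's default is never used.
def pvTrendOf (d : List (String × String)) : String :=
  (PySem.Dict.ofList d).getD "trend" ""

def determine_overall_trend_py (improvements : List (String × List (String × String))) : String :=
  if improvements.isEmpty then "no_data" else
  let vals := (PySem.Dict.ofList improvements).values
  let improving_count : Int :=
    vals.foldl (fun acc d => if pvTrendOf d == "improving" then acc + 1 else acc) 0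
  let declining_count : Int :=
    vals.foldl (fun acc d => if pvTrendOf d == "declining" then acc + 1 else acc) 0
  if improving_count > declining_count then "improving"
  else if declining_count > improving_count then "declining"
  else "stable"

-- ===== PORT B =====
-- The Python list used as a stack (append / [-1] / pop at the end) is ported as a
-- Lean list with the top at the head (push / head / tail), the standard stack encoding.
def pvStackStep (stack : List String) (d : List (String × String)) : List String :=
  let t := pvTrendOf d
  if t == "improving" || t == "declining" then
    match stack with
    | [] => [t]
    | top :: rest => if top != t then rest else t :: top :: rest
  else stack

def determine_overall_trend_py_alt (improvements : List (String × List (String × String))) : String :=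
  if improvements.isEmpty then "no_data" else
  let stack := (PySem.Dict.ofList improvements).values.foldl pvStackStep []
  match stack with
  | [] => "stable"
  | top :: _ => top

-- ===== PRECONDITION & SPEC =====
-- Pre_ excludes only the inputs where A raises KeyError: some value dict lacks the key "trend".
def Pre_determine_overall_trend_py (improvements : List (String × List (String × String))) : Prop :=
  (improvements.all (fun p => p.2.any (fun q => q.1 == "trend"))) = true
instance (improvements : List (String × List (String × String))) : Decidable (Pre_determine_overall_trend_py improvements) := by unfold Pre_determine_overall_trend_py; infer_instance

def pvWitness_determine_overall_trend_py : (List (String × List (String × String))) :=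
  [("m1", [("trend", "improving")]), ("m2", [("trend", "declining")])]

def Spec_determine_overall_trend_py (improvements : List (String × List (String × String))) (out : String) : Prop := out = determine_overall_trend_py_alt improvements
instance (improvements : List (String × List (String × String))) (out : String) : Decidable (Spec_determine_overall_trend_py improvements out) := by unfold Spec_determine_overall_trend_py; infer_instance

-- ===== CLAIM (what is proved, stated in full; the proofs are below) =====
def Claim_equal_determine_overall_trend_py : Prop := ∀ (improvements : List (String × List (String × String))), Dom_determine_overall_trend_py improvements → Pre_determine_overall_trend_py improvements → Spec_determine_overall_trend_py improvements (determine_overall_trend_py improvements)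

-- ===== LEMMAS AND PROOFS =====
-- The canonical homogeneous stack with signed balance n.
def pvRepr (n : Int) : List String :=
  if 0 < n then List.replicate n.toNat "improving" else List.replicate (-n).toNat "declining"

def pvNetStep (n : Int) (d : List (String × String)) : Int :=
  if pvTrendOf d == "improving" then n + 1
  else if pvTrendOf d == "declining" then n - 1
  else n

theorem stackStep_repr (n : Int) (d : List (String × String)) :
    pvStackStep (pvRepr n) d = pvRepr (pvNetStep n d) := by
  by_cases h1 : pvTrendOf d = "improving"
  · -- push onto (or cancel from) the stack; net goes to n + 1
    unfold pvStackStep pvNetStep pvRepr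
    simp only [h1, beq_self_eq_true, if_true, Bool.true_or]
    rcases lt_trichotomy 0 n with hn | hn | hn
    · obtain ⟨m, hm⟩ : ∃ m, n.toNat = m + 1 := ⟨n.toNat - 1, by omega⟩
      have ht : (n + 1).toNat = m + 2 := by omega
      simp only [if_pos hn, if_pos (by omega : (0:Int) < n + 1), hm, ht, List.replicate_succ]
      simp
    · subst hn; simp [List.replicate_succ]
    · have hk : (-n).toNat = (-(n+1)).toNat + 1 := by omega
      simp only [if_neg (by omega : ¬ (0:Int) < n), hk, List.replicate_succ]
      by_cases hp : (0:Int) < n + 1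
      · omega
      · simp [hp]
  · by_cases h2 : pvTrendOf d = "declining"
    · have hnet : pvNetStep n d = n - 1 := by
        simp [pvNetStep, h2]
      rw [hnet]
      unfold pvStackStep pvRepr
      simp only [h2, beq_self_eq_true, Bool.or_true]
      rcases lt_trichotomy 0 n with hn | hn | hn
      · obtain ⟨m, hm⟩ : ∃ m, n.toNat = m + 1 := ⟨n.toNat - 1, by omega⟩
        rw [if_pos hn, hm, List.replicate_succ]
        by_cases hp : (0:Int) < n - 1
        · rw [if_pos hp, show (n-1).toNat = m by omega]
          simp
        · rw [if_neg hp, show (-(n-1)).toNat = 0 by omega]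
          have hm0 : m = 0 := by omega
          simp [hm0]
      · subst hn
        simp [List.replicate_succ]
      · obtain ⟨m, hm⟩ : ∃ m, (-n).toNat = m + 1 := ⟨(-n).toNat - 1, by omega⟩
        rw [if_neg (by omega : ¬ (0:Int) < n), if_neg (by omega : ¬ (0:Int) < n - 1), hm,
          show (-(n-1)).toNat = m + 2 by omega, List.replicate_succ, List.replicate_succ,
          List.replicate_succ]
        simp
    · unfold pvStackStep pvNetStep
      simp [h1, h2]

theorem stack_eq_repr (l : List (List (String × String))) (n : Int) :
    l.foldl pvStackStep (pvRepr n) = pvRepr (l.foldl pvNetStep n) := by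
  induction l generalizing n with
  | nil => rfl
  | cons d rest ih => simp only [List.foldl]; rw [stackStep_repr]; exact ih _

theorem net_eq_diff (l : List (List (String × String))) (a b : Int) :
    l.foldl pvNetStep (a - b)
    = l.foldl (fun acc d => if pvTrendOf d == "improving" then acc + 1 else acc) a
      - l.foldl (fun acc d => if pvTrendOf d == "declining" then acc + 1 else acc) b := by
  induction l generalizing a b with
  | nil => simp
  | cons d rest ih =>
    simp only [List.foldl, pvNetStep]
    by_cases h1 : pvTrendOf d == "improving"
    · have h2 : ¬ (pvTrendOf d == "declining") := by
        simp only [beq_iff_eq] at *; simp [h1]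
      have e : a - b + 1 = a + 1 - b := by ring
      simpa [h1, h2, e] using ih (a + 1) b
    · by_cases h2 : pvTrendOf d == "declining"
      · have : a - b - 1 = a - (b + 1) := by ring
        simpa [h1, h2, this] using ih a (b + 1)
      · simpa [h1, h2] using ih a b

-- ===== VERDICT (by name: the statement is the Claim_ definition above) =====
theorem determine_overall_trend_py_spec : Claim_equal_determine_overall_trend_py := by
  intro improvements _ _
  unfold Spec_determine_overall_trend_py determine_overall_trend_py determine_overall_trend_py_alt
  by_cases he : improvements.isEmpty
  · simp [he]
  · simp only [he]
    have hs : (PySem.Dict.ofList improvements).values.foldl pvStackStep []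
        = pvRepr ((PySem.Dict.ofList improvements).values.foldl pvNetStep 0) := by
      have := stack_eq_repr ((PySem.Dict.ofList improvements).values) 0
      simpa [pvRepr] using this
    have h := net_eq_diff ((PySem.Dict.ofList improvements).values) 0 0
    simp only [sub_zero] at h
    rw [hs, h]
    set i := ((PySem.Dict.ofList improvements).values).foldl (fun acc d => if pvTrendOf d == "improving" then acc + 1 else acc) (0:Int)
    set dc := ((PySem.Dict.ofList improvements).values).foldl (fun acc d => if pvTrendOf d == "declining" then acc + 1 else acc) (0:Int)
    unfold pvRepr
    by_cases hgt : i > dc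
    · have hp : 0 < i - dc := by omega
      have ht : (i - dc).toNat = ((i - dc).toNat - 1) + 1 := by omega
      simp only [if_pos hgt, if_pos hp]
      rw [ht, List.replicate_succ]
    · by_cases hlt : dc > i
      · have hp : ¬ (0 < i - dc) := by omega
        have ht : (-(i - dc)).toNat = ((-(i - dc)).toNat - 1) + 1 := by omega
        simp only [if_neg (by omega : ¬ i > dc), if_pos hlt, if_neg hp]
        rw [ht, List.replicate_succ]
      · have he2 : i - dc = 0 := by omega
        simp [hgt, hlt, he2]
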